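-- pv_equiv track=rewrite | github.com/easysergey42/rep | Oct_27/foo.py | fn
-- ===== SOURCE A (Python) =====
-- def fn(s1, s2, m):
--     if s1+s2 >= 231:
--         return m % 2 == 0
--     if m == 0:
--         return False
--     h = [fn(s1+2, s2, m-1), fn(s1*2, s2, m-1),
--          fn(s1, s2+2, m-1), fn(s1, s2*2, m-1)]
--     return any(h) if (m-1) % 2 == 0 else all(h)
-- ===== SOURCE B (Python) =====
-- def fn(s1, s2, m):
--     memo = {}
--
--     def solve(s1, s2, m):
--         if s1 + s2 >= 231:
--             return m % 2 == 0
--         if m == 0: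
--             return False
--         key = (s1, s2, m)
--         if key in memo:
--             return memo[key]
--         r1 = solve(s1 + 2, s2, m - 1)
--         r2 = solve(s1 * 2, s2, m - 1)
--         r3 = solve(s1, s2 + 2, m - 1)
--         r4 = solve(s1, s2 * 2, m - 1)
--         res = any((r1, r2, r3, r4)) if (m - 1) % 2 == 0 else all((r1, r2, r3, r4))
--         memo[key] = res
--         return res
--
--     return solve(s1, s2, m)
-- ===== Notes on version B (the rewrite author's own statement) =====
-- stated objective: faster
-- what changed: B memoizes the game-tree recursion on (s1,s2,m) states in a dictionary, collapsing A's exponential call tree into one evaluation per distinct reachable state, so B answers instantly (e.g. s1=s2=1, m=10^6) where A's tree is astronomically large.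
import Mathlib
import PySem

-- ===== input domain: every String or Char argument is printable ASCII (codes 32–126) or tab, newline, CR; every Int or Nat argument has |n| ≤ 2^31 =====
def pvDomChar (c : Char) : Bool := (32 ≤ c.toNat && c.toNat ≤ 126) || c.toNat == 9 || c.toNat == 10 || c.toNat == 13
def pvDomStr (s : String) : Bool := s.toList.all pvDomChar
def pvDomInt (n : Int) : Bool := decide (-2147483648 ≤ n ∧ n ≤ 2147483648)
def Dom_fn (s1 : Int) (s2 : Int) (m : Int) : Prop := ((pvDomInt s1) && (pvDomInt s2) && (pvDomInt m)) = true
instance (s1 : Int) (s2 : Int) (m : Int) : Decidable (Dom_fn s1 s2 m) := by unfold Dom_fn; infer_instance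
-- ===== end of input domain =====

-- B memoizes A's game-tree recursion on (s1,s2,m) states, turning the exponential call tree into one evaluation per state; return value proved equal on Pre_.


-- ===== PORT A =====
-- Literal port of A; the `m ≤ 0` guard only makes the recursion total: Python
-- recurses without bound there (RecursionError), and those inputs are outside Pre_fn.
def fn (s1 : Int) (s2 : Int) (m : Int) : Bool :=
  if 231 ≤ s1 + s2 then PySem.Int.mod m 2 == 0
  else if m == 0 then false
  else if m ≤ 0 then false
  else
    let h := [fn (s1 + 2) s2 (m - 1), fn (s1 * 2) s2 (m - 1),
              fn s1 (s2 + 2) (m - 1), fn s1 (s2 * 2) (m - 1)]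
    if PySem.Int.mod (m - 1) 2 == 0 then h.any id else h.all id
termination_by m.toNat
decreasing_by all_goals omega

-- ===== PORT B =====
-- The memoizing helper of Source B, with the dict threaded through explicitly;
-- same totality guard `m ≤ 0` (outside Pre_fn).
def solveB (s1 : Int) (s2 : Int) (m : Int) (memo : PySem.Dict (Int × Int × Int) Bool) :
    Bool × PySem.Dict (Int × Int × Int) Bool :=
  if 231 ≤ s1 + s2 then (PySem.Int.mod m 2 == 0, memo)
  else if m == 0 then (false, memo)
  else if m ≤ 0 then (false, memo)
  else
    match memo.get? (s1, s2, m) with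
    | some v => (v, memo)
    | none =>
      let r1 := solveB (s1 + 2) s2 (m - 1) memo
      let r2 := solveB (s1 * 2) s2 (m - 1) r1.2
      let r3 := solveB s1 (s2 + 2) (m - 1) r2.2
      let r4 := solveB s1 (s2 * 2) (m - 1) r3.2
      let res := if PySem.Int.mod (m - 1) 2 == 0
                 then [r1.1, r2.1, r3.1, r4.1].any id
                 else [r1.1, r2.1, r3.1, r4.1].all id
      (res, r4.2.insert (s1, s2, m) res)
termination_by m.toNat
decreasing_by all_goals omega

def fn_alt (s1 : Int) (s2 : Int) (m : Int) : Bool :=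
  (solveB s1 s2 m PySem.Dict.empty).1

-- ===== PRECONDITION & SPEC =====
-- Pre_ excludes only inputs on which A raises RecursionError or cannot feasibly be evaluated:
-- with s1+s2 < 231, a negative m recurses forever; with s1 ≥ 1 and s2 ≥ 1 every step raises
-- the sum, so the depth stays below ~115 and every m ≥ 0 is admitted; but if a coordinate is
-- below 1 a branch (doubling the nonpositive one) leaves the sum unchanged or lower, so the
-- recursion depth equals m — beyond CPython's ~1000-frame limit A raises, and already well
-- below it A's un-memoized tree is astronomically large, so m is capped at 700 for that shape
-- (on every excluded input neither program finishes: A either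
-- raises RecursionError or needs astronomically many calls).
def Pre_fn (s1 : Int) (s2 : Int) (m : Int) : Prop :=
  231 ≤ s1 + s2 ∨ (0 ≤ m ∧ 1 ≤ s1 ∧ 1 ≤ s2) ∨ (0 ≤ m ∧ m ≤ 700)
instance (s1 : Int) (s2 : Int) (m : Int) : Decidable (Pre_fn s1 s2 m) := by unfold Pre_fn; infer_instance
def pvWitness_fn : Int × Int × Int := (1, 113, 3)

def Spec_fn (s1 : Int) (s2 : Int) (m : Int) (out : Bool) : Prop := out = fn_alt s1 s2 m
instance (s1 : Int) (s2 : Int) (m : Int) (out : Bool) : Decidable (Spec_fn s1 s2 m out) := by unfold Spec_fn; infer_instance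

-- ===== CLAIM (what is proved, stated in full; the proofs are below) =====
def Claim_equal_fn : Prop := ∀ (s1 : Int) (s2 : Int) (m : Int), Dom_fn s1 s2 m → Pre_fn s1 s2 m → Spec_fn s1 s2 m (fn s1 s2 m)

-- ===== LEMMAS AND PROOFS =====

-- every value stored in the memo table is the value of A's recursion
def MemoOK (memo : PySem.Dict (Int × Int × Int) Bool) : Prop :=
  ∀ a b c v, memo.get? (a, b, c) = some v → v = fn a b c

lemma solveB_ok : ∀ (n : Nat) (s1 s2 m : Int) (memo : PySem.Dict (Int × Int × Int) Bool),
    m.toNat ≤ n → MemoOK memo →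
    (solveB s1 s2 m memo).1 = fn s1 s2 m ∧ MemoOK (solveB s1 s2 m memo).2 := by
  intro n
  induction n with
  | zero =>
    intro s1 s2 m memo hle hok
    rw [solveB]
    by_cases h1 : 231 ≤ s1 + s2
    · rw [if_pos h1]; exact ⟨by rw [fn, if_pos h1], hok⟩
    · rw [if_neg h1]
      by_cases h2 : (m == 0) = true
      · rw [if_pos h2]; exact ⟨by rw [fn, if_neg h1, if_pos h2], hok⟩
      · have h3 : m ≤ 0 := by omega
        rw [if_neg h2, if_pos h3]
        exact ⟨by rw [fn, if_neg h1, if_neg h2, if_pos h3], hok⟩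
  | succ n ih =>
    intro s1 s2 m memo hle hok
    rw [solveB]
    by_cases h1 : 231 ≤ s1 + s2
    · rw [if_pos h1]; exact ⟨by rw [fn, if_pos h1], hok⟩
    rw [if_neg h1]
    by_cases h2 : (m == 0) = true
    · rw [if_pos h2]; exact ⟨by rw [fn, if_neg h1, if_pos h2], hok⟩
    rw [if_neg h2]
    by_cases h3 : m ≤ 0
    · rw [if_pos h3]; exact ⟨by rw [fn, if_neg h1, if_neg h2, if_pos h3], hok⟩
    rw [if_neg h3]
    have hm1 : (m - 1).toNat ≤ n := by omega
    cases hmemo : memo.get? (s1, s2, m) with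
    | some v =>
      simp only [hmemo]
      exact ⟨hok _ _ _ _ hmemo, hok⟩
    | none =>
      simp only [hmemo]
      obtain ⟨e1, k1⟩ := ih (s1 + 2) s2 (m - 1) memo hm1 hok
      obtain ⟨e2, k2⟩ := ih (s1 * 2) s2 (m - 1) _ hm1 k1
      obtain ⟨e3, k3⟩ := ih s1 (s2 + 2) (m - 1) _ hm1 k2
      obtain ⟨e4, k4⟩ := ih s1 (s2 * 2) (m - 1) _ hm1 k3
      by_cases hc : (PySem.Int.mod (m - 1) 2 == 0) = true
      · rw [if_pos hc]
        constructor
        · rw [fn, if_neg h1, if_neg h2, if_neg h3, if_pos hc]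
          simp [e1, e2, e3, e4]
        · intro a b c v hv
          rw [PySem.Dict.get?_insert] at hv
          by_cases hk : (a, b, c) = (s1, s2, m)
          · rw [if_pos hk] at hv
            injection hk with ha hbc
            injection hbc with hb hc'
            subst ha; subst hb; subst hc'
            injection hv with hv
            subst hv
            rw [fn, if_neg h1, if_neg h2, if_neg h3, if_pos hc]
            simp [e1, e2, e3, e4]
          · rw [if_neg hk] at hv
            exact k4 _ _ _ _ hv
      · rw [if_neg hc]
        constructor
        · rw [fn, if_neg h1, if_neg h2, if_neg h3, if_neg hc]
          simp [e1, e2, e3, e4]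
        · intro a b c v hv
          rw [PySem.Dict.get?_insert] at hv
          by_cases hk : (a, b, c) = (s1, s2, m)
          · rw [if_pos hk] at hv
            injection hk with ha hbc
            injection hbc with hb hc'
            subst ha; subst hb; subst hc'
            injection hv with hv
            subst hv
            rw [fn, if_neg h1, if_neg h2, if_neg h3, if_neg hc]
            simp [e1, e2, e3, e4]
          · rw [if_neg hk] at hv
            exact k4 _ _ _ _ hv

-- ===== VERDICT (by name: the statement is the Claim_ definition above) =====
theorem fn_spec : Claim_equal_fn := by
  intro s1 s2 m _ _
  unfold Spec_fn fn_alt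
  have h := solveB_ok m.toNat s1 s2 m PySem.Dict.empty le_rfl
    (by intro a b c v hv; simp [PySem.Dict.get?_empty] at hv)
  exact h.1.symm
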